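-- pv_equiv track=rewrite | github.com/pedrommaiaa/cccm | src/cccm/core/decisions.py | extract_decision_summary
-- ===== SOURCE A (Python) =====
-- def extract_decision_summary(message: str, max_chars: int = 500) -> str:
--     """Extract the most decision-relevant portion of a message."""
--     lines = message.strip().split("\n")
--
--     # Look for lines containing decision keywords
--     decision_keywords = {
--         "decided", "chose", "selected", "going with", "will use",
--         "because", "instead of", "trade-off", "approach", "architecture",
--     }
--
--     relevant: list[str] = []
--     for i, line in enumerate(lines):
--         line_lower = line.lower()
--         if any(kw in line_lower for kw in decision_keywords):
--             # Include this line and some context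
--             start = max(0, i - 1)
--             end = min(len(lines), i + 3)
--             relevant.extend(lines[start:end])
--
--     if relevant:
--         # Deduplicate while preserving order
--         seen: set[str] = set()
--         unique: list[str] = []
--         for line in relevant:
--             if line not in seen:
--                 seen.add(line)
--                 unique.append(line)
--         return "\n".join(unique)[:max_chars]
--
--     # Fallback: return beginning of message
--     return message[:max_chars]
-- ===== SOURCE B (Python) =====
-- def extract_decision_summary(message: str, max_chars: int = 500) -> str:
--     """Extract the most decision-relevant portion of a message.
--
--     One marking pass: a line is kept iff some line in the window j-2..j+1
--     around it matches a decision keyword; kept lines are emitted in order,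
--     deduplicated by content on the fly.
--     """
--     lines = message.strip().split("\n")
--
--     decision_keywords = (
--         "decided", "chose", "selected", "going with", "will use",
--         "because", "instead of", "trade-off", "approach", "architecture",
--     )
--
--     hits = [any(kw in line.lower() for kw in decision_keywords) for line in lines]
--
--     kept_any = False
--     seen: set[str] = set()
--     out: list[str] = []
--     for j, line in enumerate(lines):
--         if any(hits[max(0, j - 2):j + 2]):
--             kept_any = True
--             if line not in seen:
--                 seen.add(line)
--                 out.append(line)
--
--     if kept_any:
--         return "\n".join(out)[:max_chars]
--     return message[:max_chars]
-- ===== Notes on version B (the rewrite author's own statement) =====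
-- stated objective: alternative
-- what changed: Instead of extending an overlapping-windows list per keyword match and deduplicating it in a second pass, B precomputes per-line keyword hits, marks each line kept iff some line in its j-2..j+1 window hits, and emits kept lines in one content-deduplicating pass.
import Mathlib
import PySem

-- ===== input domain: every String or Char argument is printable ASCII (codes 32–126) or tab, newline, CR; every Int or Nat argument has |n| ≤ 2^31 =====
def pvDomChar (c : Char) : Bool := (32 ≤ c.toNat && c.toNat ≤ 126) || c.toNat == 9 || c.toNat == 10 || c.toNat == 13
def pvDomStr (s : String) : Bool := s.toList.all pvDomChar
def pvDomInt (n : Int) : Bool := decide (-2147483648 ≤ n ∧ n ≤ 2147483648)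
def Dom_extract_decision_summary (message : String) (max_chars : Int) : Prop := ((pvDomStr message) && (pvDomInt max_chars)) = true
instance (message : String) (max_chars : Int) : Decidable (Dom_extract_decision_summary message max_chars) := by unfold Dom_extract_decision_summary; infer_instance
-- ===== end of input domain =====

-- B replaces A's per-match overlapping context windows (collected with duplicates, then
-- deduplicated in a second pass) by a per-line window test plus one content-deduplicating pass;
-- alternative decomposition, same exact return value.

-- the decision keywords (a Python set literal in A, a tuple in B; only membership tests are made)
def pvKeywords : List String :=
  ["decided", "chose", "selected", "going with", "will use",
   "because", "instead of", "trade-off", "approach", "architecture"]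

-- ===== PORT A =====
def extract_decision_summary (message : String) (max_chars : Int) : String :=
  let lines := (PySem.Str.split? (PySem.Str.strip message) "\n").getD []
  let relevant := (PySem.List.enumerate lines).foldl
    (fun acc il =>
      if pvKeywords.any (fun kw => PySem.Str.isIn kw (PySem.Str.lower il.2)) then
        acc ++ PySem.List.slice lines (some (max 0 (il.1 - 1)))
          (some (min (PySem.List.len lines) (il.1 + 3)))
      else acc) []
  if relevant ≠ [] then
    let su := relevant.foldl
      (fun (p : PySem.Set String × List String) line =>
        if !(PySem.Set.contains p.1 line) then (PySem.Set.add p.1 line, p.2 ++ [line])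
        else p) (PySem.Set.empty, [])
    PySem.Str.slice (PySem.Str.join "\n" su.2) none (some max_chars)
  else
    PySem.Str.slice message none (some max_chars)

-- ===== PORT B =====
def extract_decision_summary_alt (message : String) (max_chars : Int) : String :=
  let lines := (PySem.Str.split? (PySem.Str.strip message) "\n").getD []
  let hits := lines.map
    (fun line => pvKeywords.any (fun kw => PySem.Str.isIn kw (PySem.Str.lower line)))
  let st := (PySem.List.enumerate lines).foldl
    (fun (st : Bool × PySem.Set String × List String) jl =>
      if (PySem.List.slice hits (some (max 0 (jl.1 - 2))) (some (jl.1 + 2))).any id then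
        (true,
         if !(PySem.Set.contains st.2.1 jl.2) then (PySem.Set.add st.2.1 jl.2, st.2.2 ++ [jl.2])
         else st.2)
      else st)
    (false, PySem.Set.empty, [])
  if st.1 then PySem.Str.slice (PySem.Str.join "\n" st.2.2) none (some max_chars)
  else PySem.Str.slice message none (some max_chars)

-- ===== PRECONDITION & SPEC =====
def Spec_extract_decision_summary (message : String) (max_chars : Int) (out : String) : Prop := out = extract_decision_summary_alt message max_chars
instance (message : String) (max_chars : Int) (out : String) : Decidable (Spec_extract_decision_summary message max_chars out) := by unfold Spec_extract_decision_summary; infer_instance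

-- ===== CLAIM (what is proved, stated in full; the proofs are below) =====
def Claim_equal_extract_decision_summary : Prop := ∀ (message : String) (max_chars : Int), Dom_extract_decision_summary message max_chars → Spec_extract_decision_summary message max_chars (extract_decision_summary message max_chars)

-- ===== LEMMAS AND PROOFS =====

-- the keyword predicate both programs apply to a line
def pvP (s : String) : Bool := pvKeywords.any (fun kw => PySem.Str.isIn kw (PySem.Str.lower s))

-- indices of the lines that match (ascending)
def pvMatches (L : List String) : List Nat :=
  (List.range L.length).filter (fun k => pvP (L.getD k ""))

-- dedup keeping first occurrences, given an already-seen set (membership only matters)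
def pvDedupFrom (seen : List String) : List String → List String
  | [] => []
  | x :: xs => if x ∈ seen then pvDedupFrom seen xs else x :: pvDedupFrom (x :: seen) xs

-- the context window A appends for a match at line m, as lines by index
def pvWin (L : List String) (m : Nat) : List String :=
  (List.range' (m - 1) (min L.length (m + 3) - (m - 1))).map (fun j => L.getD j "")

-- sorted list of the indices covered by the windows of ms, everything below e excluded
def pvG (n : Nat) : Nat → List Nat → List Nat
  | _, [] => []
  | e, m :: ms =>
      List.range' (max e (m - 1)) (min n (m + 3) - max e (m - 1)) ++
        pvG n (max e (min n (m + 3))) ms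

theorem pvDedupFrom_congr (s₁ s₂ : List String) (l : List String)
    (h : ∀ x, x ∈ s₁ ↔ x ∈ s₂) : pvDedupFrom s₁ l = pvDedupFrom s₂ l := by
  induction l generalizing s₁ s₂ with
  | nil => rfl
  | cons x xs ih =>
    simp only [pvDedupFrom]
    by_cases hx : x ∈ s₁
    · rw [if_pos hx, if_pos ((h x).mp hx)]; exact ih _ _ h
    · rw [if_neg hx, if_neg (fun hc => hx ((h x).mpr hc))]
      refine congrArg _ (ih _ _ ?_)
      intro y; simp only [List.mem_cons]
      exact or_congr Iff.rfl (h y)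

theorem pvDedupFrom_append (s xs ys : List String) :
    pvDedupFrom s (xs ++ ys) = pvDedupFrom s xs ++ pvDedupFrom (xs ++ s) ys := by
  induction xs generalizing s with
  | nil => simp [pvDedupFrom]
  | cons x xs ih =>
    simp only [List.cons_append, pvDedupFrom]
    by_cases hx : x ∈ s
    · rw [if_pos hx, if_pos hx, ih]
      refine congrArg _ (pvDedupFrom_congr _ _ _ ?_)
      intro y; simp only [List.mem_append, List.mem_cons]
      have hx' : y = x → y ∈ s := fun h => h ▸ hx
      tauto
    · rw [if_neg hx, if_neg hx, List.cons_append, ih]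
      refine congrArg _ (congrArg _ (pvDedupFrom_congr _ _ _ ?_))
      intro y; simp only [List.mem_append, List.mem_cons]; tauto

theorem pvDedupFrom_drop (s xs ys : List String) (h : ∀ x ∈ xs, x ∈ s) :
    pvDedupFrom s (xs ++ ys) = pvDedupFrom s ys := by
  induction xs with
  | nil => rfl
  | cons x xs ih =>
    simp only [List.cons_append, pvDedupFrom, if_pos (h x (List.mem_cons_self))]
    exact ih (fun y hy => h y (List.mem_cons_of_mem _ hy))

-- a drop/take slice as a map over its index range
theorem pvDropTake {α : Type} (l : List α) (a k : Nat) (d : α) :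
    (l.drop a).take k = (List.range' a (min (a + k) l.length - a)).map (fun j => l.getD j d) := by
  apply List.ext_getElem
  · simp only [List.length_take, List.length_drop, List.length_map, List.length_range']
    omega
  · intro i h1 h2
    simp only [List.length_take, List.length_drop] at h1
    simp only [List.getElem_take, List.getElem_drop, List.getElem_map, List.getElem_range']
    rw [List.getD_eq_getElem?_getD, List.getElem?_eq_getElem (by omega), Option.getD_some]
    simp

-- A's dedup loop
theorem pvDedupFold (l : List String) (s : PySem.Set String) (acc : List String) :
    (l.foldl (fun (p : PySem.Set String × List String) line =>
        if !(PySem.Set.contains p.1 line) then (PySem.Set.add p.1 line, p.2 ++ [line])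
        else p) (s, acc)) =
      ((l.foldl (fun (p : PySem.Set String × List String) line =>
        if !(PySem.Set.contains p.1 line) then (PySem.Set.add p.1 line, p.2 ++ [line])
        else p) (s, acc)).1, acc ++ pvDedupFrom s l) ∧
    (∀ x, x ∈ (l.foldl (fun (p : PySem.Set String × List String) line =>
        if !(PySem.Set.contains p.1 line) then (PySem.Set.add p.1 line, p.2 ++ [line])
        else p) (s, acc)).1 ↔ x ∈ s ∨ x ∈ l) := by
  induction l generalizing s acc with
  | nil => exact ⟨by simp [pvDedupFrom], by simp⟩
  | cons x l ih =>
    simp only [List.foldl_cons]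
    by_cases hx : x ∈ s
    · have hc : PySem.Set.contains s x = true := (PySem.Set.contains_iff s x).mpr hx
      rw [hc]
      simp only [Bool.not_true, Bool.false_eq_true, if_false]
      refine ⟨?_, ?_⟩
      · rw [(ih s acc).1]
        simp only [pvDedupFrom, if_pos hx]
      · intro y
        rw [(ih s acc).2 y]
        simp only [List.mem_cons]
        have hx' : y = x → y ∈ s := fun h => h ▸ hx
        tauto
    · have hc : PySem.Set.contains s x = false := by
        rcases Bool.eq_false_or_eq_true (PySem.Set.contains s x) with h | h
        · exact absurd ((PySem.Set.contains_iff s x).mp h) hx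
        · exact h
      rw [hc]
      simp only [Bool.not_false, if_true]
      have hadd : PySem.Set.add s x = s ++ [x] := by
        simp only [PySem.Set.add, hc, Bool.false_eq_true, if_false]
      rw [hadd]
      refine ⟨?_, ?_⟩
      · rw [(ih (s ++ [x]) (acc ++ [x])).1]
        simp only [pvDedupFrom, if_neg hx]
        rw [pvDedupFrom_congr (s ++ [x]) (x :: s) l (by intro y; simp; tauto)]
        simp
      · intro y
        rw [(ih (s ++ [x]) (acc ++ [x])).2 y]
        simp only [List.mem_append, List.mem_cons]
        tauto

theorem pvG_mem (n : Nat) (ms : List Nat) (e j : Nat)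
    (hms : ms.Pairwise (· < ·)) (hlt : ∀ m ∈ ms, m < n) (he : ∀ m ∈ ms, e ≤ min n (m + 3)) :
    j ∈ pvG n e ms ↔ e ≤ j ∧ ∃ m ∈ ms, m - 1 ≤ j ∧ j < min n (m + 3) := by
  induction ms generalizing e with
  | nil => simp [pvG]
  | cons m ms ih =>
    have hmn : m < n := hlt m List.mem_cons_self
    have hme : e ≤ min n (m + 3) := he m List.mem_cons_self
    rw [List.pairwise_cons] at hms
    have ih' := ih (max e (min n (m + 3))) hms.2 (fun x hx => hlt x (List.mem_cons_of_mem _ hx))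
      (fun x hx => by
        have := hms.1 x hx
        have := he x (List.mem_cons_of_mem _ hx)
        omega)
    simp only [pvG, List.mem_append, List.mem_range'_1, ih']
    constructor
    · rintro (⟨hi1, hi2⟩ | ⟨h1, m', hm', h2, h3⟩)
      · exact ⟨by omega, m, List.mem_cons_self, by omega, by omega⟩
      · exact ⟨by omega, m', List.mem_cons_of_mem _ hm', h2, h3⟩
    · rintro ⟨hej, m', hm', h2, h3⟩
      rcases List.mem_cons.mp hm' with rfl | hm'
      · exact Or.inl ⟨by omega, by omega⟩
      · by_cases hj : max e (min n (m + 3)) ≤ j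
        · exact Or.inr ⟨hj, m', hm', h2, h3⟩
        · have hmm' := hms.1 m' hm'
          exact Or.inl ⟨by omega, by omega⟩

theorem pvG_pairwise (n : Nat) (ms : List Nat) (e : Nat)
    (hms : ms.Pairwise (· < ·)) (hlt : ∀ m ∈ ms, m < n) (he : ∀ m ∈ ms, e ≤ min n (m + 3)) :
    (pvG n e ms).Pairwise (· < ·) := by
  induction ms generalizing e with
  | nil => simp [pvG]
  | cons m ms ih =>
    have hmn : m < n := hlt m List.mem_cons_self
    rw [List.pairwise_cons] at hms
    have hlt' : ∀ x ∈ ms, x < n := fun x hx => hlt x (List.mem_cons_of_mem _ hx)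
    have he' : ∀ x ∈ ms, max e (min n (m + 3)) ≤ min n (x + 3) := fun x hx => by
      have := hms.1 x hx
      have := he x (List.mem_cons_of_mem _ hx)
      omega
    simp only [pvG]
    refine List.pairwise_append.mpr ⟨List.pairwise_lt_range', ih _ hms.2 hlt' he', ?_⟩
    · intro a ha b hb
      rw [List.mem_range'_1] at ha
      rw [pvG_mem n ms _ b hms.2 hlt' he'] at hb
      omega

theorem pvPairwise_lt_ext (l₁ l₂ : List Nat) (h₁ : l₁.Pairwise (· < ·))
    (h₂ : l₂.Pairwise (· < ·)) (h : ∀ x, x ∈ l₁ ↔ x ∈ l₂) : l₁ = l₂ := by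
  induction l₁ generalizing l₂ with
  | nil =>
    cases l₂ with
    | nil => rfl
    | cons y l₂ => exact absurd ((h y).mpr List.mem_cons_self) (List.not_mem_nil)
  | cons x l₁ ih =>
    cases l₂ with
    | nil => exact absurd ((h x).mp List.mem_cons_self) (List.not_mem_nil)
    | cons y l₂ =>
      rw [List.pairwise_cons] at h₁ h₂
      have hxy : x = y := by
        rcases List.mem_cons.mp ((h x).mp List.mem_cons_self) with h' | h'
        · exact h'
        · rcases List.mem_cons.mp ((h y).mpr List.mem_cons_self) with h'' | h''
          · omega
          · have := h₁.1 y h''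
            have := h₂.1 x h'
            omega
      subst hxy
      refine congrArg _ (ih l₂ h₁.2 h₂.2 ?_)
      intro z
      constructor
      · intro hz
        rcases List.mem_cons.mp ((h z).mp (List.mem_cons_of_mem _ hz)) with rfl | h'
        · exact absurd (h₁.1 z hz) (lt_irrefl z)
        · exact h'
      · intro hz
        rcases List.mem_cons.mp ((h z).mpr (List.mem_cons_of_mem _ hz)) with rfl | h'
        · exact absurd (h₂.1 z hz) (lt_irrefl z)
        · exact h'

-- core A-side lemma: flatMapped windows dedup to the covered indices in order
theorem pvMain (L : List String) (ms : List Nat) (e : Nat) (seen : List String)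
    (hms : ms.Pairwise (· < ·)) (hlt : ∀ m ∈ ms, m < L.length)
    (he : ∀ m ∈ ms, e ≤ min L.length (m + 3)) (hen : e ≤ L.length)
    (hinv : ∀ j, j < e → (∃ m ∈ ms, m - 1 ≤ j) → j < L.length → L.getD j "" ∈ seen) :
    pvDedupFrom seen (ms.flatMap (pvWin L)) =
      pvDedupFrom seen ((pvG L.length e ms).map (fun j => L.getD j "")) := by
  rw [show pvWin L = (fun m => (List.range' (m - 1) (min L.length (m + 3) - (m - 1))).map
    (fun j => L.getD j "")) from rfl]
  induction ms generalizing e seen with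
  | nil => rfl
  | cons m ms ih =>
    have hmn : m < L.length := hlt m List.mem_cons_self
    have hme : e ≤ min L.length (m + 3) := he m List.mem_cons_self
    rw [List.pairwise_cons] at hms
    have hsplit : List.range' (m - 1) (min L.length (m + 3) - (m - 1)) =
        List.range' (m - 1) (max e (m - 1) - (m - 1)) ++
          List.range' (max e (m - 1)) (min L.length (m + 3) - max e (m - 1)) := by
      have h := @List.range'_append_1 (m - 1) (max e (m - 1) - (m - 1))
        (min L.length (m + 3) - max e (m - 1))
      rw [show m - 1 + (max e (m - 1) - (m - 1)) = max e (m - 1) by omega,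
        show max e (m - 1) - (m - 1) + (min L.length (m + 3) - max e (m - 1)) =
          min L.length (m + 3) - (m - 1) by omega] at h
      exact h.symm
    simp only [List.flatMap_cons, pvG]
    rw [hsplit, List.map_append, List.map_append, List.append_assoc]
    rw [pvDedupFrom_drop _ _ _ ?hpre]
    case hpre =>
      intro x hxm
      obtain ⟨j, hj, rfl⟩ := List.mem_map.mp hxm
      rw [List.mem_range'_1] at hj
      exact hinv j (by omega) ⟨m, List.mem_cons_self, by omega⟩ (by omega)
    rw [pvDedupFrom_append, pvDedupFrom_append]
    congr 1
    refine ih _ _ hms.2 (fun x hx => hlt x (List.mem_cons_of_mem _ hx)) ?_ (by omega) ?_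
    · intro m' hm'
      have := hms.1 m' hm'
      have := he m' (List.mem_cons_of_mem _ hm')
      omega
    · intro j hj1 hj2 hj3
      obtain ⟨m', hm', hm2⟩ := hj2
      by_cases hcase : j < max e (m - 1)
      · have hj' : j < e := by
          have := hms.1 m' hm'
          omega
        exact List.mem_append_right _ (hinv j hj' ⟨m', List.mem_cons_of_mem _ hm', hm2⟩ hj3)
      · refine List.mem_append_left _ (List.mem_map.mpr ⟨j, ?_, rfl⟩)
        rw [List.mem_range'_1]
        omega

theorem pvFlatMapIf {α β : Type} (l : List α) (q : α → Bool) (f : α → List β) :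
    l.flatMap (fun x => if q x then f x else []) = (l.filter q).flatMap f := by
  induction l with
  | nil => rfl
  | cons x l ih => by_cases h : q x <;> simp [h, ih]

-- A's window-collecting loop, as a flatMap over the matching indices
theorem pvRelA (L : List String) :
    (PySem.List.enumerate L).foldl
      (fun acc il =>
        if pvKeywords.any (fun kw => PySem.Str.isIn kw (PySem.Str.lower il.2)) then
          acc ++ PySem.List.slice L (some (max 0 (il.1 - 1)))
            (some (min (PySem.List.len L) (il.1 + 3)))
        else acc) [] = (pvMatches L).flatMap (pvWin L) := by
  rw [PySem.List.enumerate_eq_map_pyRange L "", List.foldl_map, PySem.List.pyRange_one,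
    List.foldl_map]
  have hlen : ((PySem.List.len L) - 0).toNat = L.length := by simp [PySem.List.len]
  rw [hlen]
  rw [PySem.List.foldl_congr_mem _ _
    (fun acc k => acc ++ (if pvP (L.getD k "") then pvWin L k else [])) _ ?_]
  · rw [PySem.List.foldl_append_eq_flatMap, pvFlatMapIf, List.nil_append]
    rfl
  · intro acc k hk
    rw [List.mem_range] at hk
    dsimp only
    simp only [zero_add]
    have e1 : PySem.List.pyGetD L ((k : Nat) : Int) "" = L.getD k "" :=
      PySem.List.pyGetD_natCast L k ""
    have e2 : PySem.List.slice L (some (max 0 ((k : Int) - 1)))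
        (some (min (PySem.List.len L) ((k : Int) + 3))) = pvWin L k := by
      have h2 : max 0 ((k : Int) - 1) = ((k - 1 : Nat) : Int) := by omega
      have h3 : min (PySem.List.len L) ((k : Int) + 3) = ((min L.length (k + 3) : Nat) : Int) := by
        simp only [PySem.List.len]; omega
      rw [h2, h3, PySem.List.slice_natCast, pvDropTake L (k - 1) _ "",
        show min ((k - 1) + (min L.length (k + 3) - (k - 1))) L.length - (k - 1) =
          min L.length (k + 3) - (k - 1) by omega]
      rfl
    rw [e1, e2]
    simp only [pvP]
    split <;> simp

-- B's per-line window test, in index form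
def pvTest (L : List String) (k : Nat) : Bool :=
  ((List.range' (k - 2) (min (k + 2) L.length - (k - 2))).map
    (fun j => (L.map pvP).getD j false)).any id

theorem pvHitsGetD (L : List String) (i : Nat) (h : i < L.length) :
    (L.map pvP).getD i false = pvP (L.getD i "") := by
  have hi : L[i]? = some L[i] := List.getElem?_eq_getElem h
  simp [List.getD_eq_getElem?_getD, List.getElem?_map, hi]

theorem pvMatches_pairwise (L : List String) : (pvMatches L).Pairwise (· < ·) :=
  List.Pairwise.sublist List.filter_sublist List.pairwise_lt_range

theorem pvMatches_lt (L : List String) : ∀ m ∈ pvMatches L, m < L.length :=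
  fun _ hm => List.mem_range.mp (List.mem_filter.mp hm).1

theorem pvTest_iff (L : List String) (k : Nat) (hk : k < L.length) :
    pvTest L k = true ↔ ∃ m ∈ pvMatches L, m - 1 ≤ k ∧ k < min L.length (m + 3) := by
  unfold pvTest
  rw [List.any_eq_true]
  constructor
  · rintro ⟨x, hx, hid⟩
    obtain ⟨j, hj, rfl⟩ := List.mem_map.mp hx
    rw [List.mem_range'_1] at hj
    have hjn : j < L.length := by omega
    rw [pvHitsGetD L j hjn] at hid
    refine ⟨j, ?_, by omega, by omega⟩
    rw [pvMatches, List.mem_filter, List.mem_range]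
    exact ⟨hjn, hid⟩
  · rintro ⟨m, hm, h1, h2⟩
    rw [pvMatches, List.mem_filter, List.mem_range] at hm
    refine ⟨(L.map pvP).getD m false, List.mem_map.mpr ⟨m, ?_, rfl⟩, ?_⟩
    · rw [List.mem_range'_1]; omega
    · show id ((L.map pvP).getD m false) = true
      rw [id, pvHitsGetD L m hm.1]; exact hm.2

theorem pvFilterTest (L : List String) :
    (List.range L.length).filter (pvTest L) = pvG L.length 0 (pvMatches L) := by
  apply pvPairwise_lt_ext
  · exact List.Pairwise.sublist List.filter_sublist List.pairwise_lt_range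
  · exact pvG_pairwise _ _ _ (pvMatches_pairwise L) (pvMatches_lt L) (fun m _ => Nat.zero_le _)
  · intro j
    rw [List.mem_filter, List.mem_range,
      pvG_mem _ _ _ _ (pvMatches_pairwise L) (pvMatches_lt L) (fun m _ => Nat.zero_le _)]
    constructor
    · rintro ⟨hj, ht⟩
      exact ⟨Nat.zero_le _, (pvTest_iff L j hj).mp ht⟩
    · rintro ⟨-, m, hm, h1, h2⟩
      have hjn : j < L.length := by omega
      exact ⟨hjn, (pvTest_iff L j hjn).mpr ⟨m, hm, h1, h2⟩⟩

theorem pvAnyTest (L : List String) :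
    (List.range L.length).any (pvTest L) = true ↔ pvMatches L ≠ [] := by
  rw [List.any_eq_true]
  constructor
  · rintro ⟨k, hk, ht⟩ hnil
    rw [List.mem_range] at hk
    obtain ⟨m, hm, -⟩ := (pvTest_iff L k hk).mp ht
    rw [hnil] at hm
    exact absurd hm List.not_mem_nil
  · intro h
    obtain ⟨m, hm⟩ := List.exists_mem_of_ne_nil _ h
    have hmn := pvMatches_lt L m hm
    exact ⟨m, List.mem_range.mpr hmn,
      (pvTest_iff L m hmn).mpr ⟨m, hm, by omega, by omega⟩⟩

theorem pvRelNil (L : List String) :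
    (pvMatches L).flatMap (pvWin L) = [] ↔ pvMatches L = [] := by
  rw [List.flatMap_eq_nil_iff]
  constructor
  · intro h
    by_contra hne
    obtain ⟨m, hm⟩ := List.exists_mem_of_ne_nil _ hne
    have hmn := pvMatches_lt L m hm
    have hlen := congrArg List.length (h m hm)
    simp only [pvWin, List.length_map, List.length_range', List.length_nil] at hlen
    omega
  · intro h
    rw [h]
    simp

-- B's marking loop, characterized
theorem pvBFold (L : List String) (test : Nat → Bool) (idxs : List Nat) (b0 : Bool)
    (p0 : PySem.Set String × List String) :
    idxs.foldl (fun (st : Bool × PySem.Set String × List String) k =>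
      if test k then
        (true,
         if !(PySem.Set.contains st.2.1 (L.getD k "")) then
           (PySem.Set.add st.2.1 (L.getD k ""), st.2.2 ++ [L.getD k ""])
         else st.2)
      else st) (b0, p0)
    = (b0 || idxs.any test,
       ((idxs.filter test).map (fun k => L.getD k "")).foldl
         (fun (p : PySem.Set String × List String) line =>
           if !(PySem.Set.contains p.1 line) then (PySem.Set.add p.1 line, p.2 ++ [line])
           else p) p0) := by
  induction idxs generalizing b0 p0 with
  | nil => simp
  | cons k idxs ih =>
    simp only [List.foldl_cons, List.any_cons, List.filter_cons]
    by_cases h : test k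
    · rw [if_pos h, h, ih]
      simp
    · simp only [h, Bool.false_eq_true, if_false, Bool.false_or]
      rw [ih]

-- B's fold over the enumerated lines, in index form
theorem pvStB (L : List String) :
    (PySem.List.enumerate L).foldl
      (fun (st : Bool × PySem.Set String × List String) jl =>
        if (PySem.List.slice
              (L.map (fun line => pvKeywords.any (fun kw => PySem.Str.isIn kw (PySem.Str.lower line))))
              (some (max 0 (jl.1 - 2))) (some (jl.1 + 2))).any id then
          (true,
           if !(PySem.Set.contains st.2.1 jl.2) then
             (PySem.Set.add st.2.1 jl.2, st.2.2 ++ [jl.2])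
           else st.2)
        else st)
      (false, PySem.Set.empty, []) =
    ((List.range L.length).any (pvTest L),
     (((List.range L.length).filter (pvTest L)).map (fun k => L.getD k "")).foldl
       (fun (p : PySem.Set String × List String) line =>
         if !(PySem.Set.contains p.1 line) then (PySem.Set.add p.1 line, p.2 ++ [line])
         else p) (PySem.Set.empty, [])) := by
  rw [PySem.List.enumerate_eq_map_pyRange L "", List.foldl_map, PySem.List.pyRange_one,
    List.foldl_map]
  have hlen : ((PySem.List.len L) - 0).toNat = L.length := by simp [PySem.List.len]
  rw [hlen]
  rw [PySem.List.foldl_congr_mem _ _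
    (fun (st : Bool × PySem.Set String × List String) k =>
      if pvTest L k then
        (true,
         if !(PySem.Set.contains st.2.1 (L.getD k "")) then
           (PySem.Set.add st.2.1 (L.getD k ""), st.2.2 ++ [L.getD k ""])
         else st.2)
      else st) _ ?_]
  · rw [pvBFold]
    simp
  · intro st k hk
    rw [List.mem_range] at hk
    dsimp only
    simp only [zero_add]
    have e1 : PySem.List.pyGetD L ((k : Nat) : Int) "" = L.getD k "" :=
      PySem.List.pyGetD_natCast L k ""
    have e2 : (PySem.List.slice
        (L.map (fun line => pvKeywords.any (fun kw => PySem.Str.isIn kw (PySem.Str.lower line))))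
        (some (max 0 ((k : Int) - 2))) (some ((k : Int) + 2))).any id = pvTest L k := by
      have h2 : max 0 ((k : Int) - 2) = ((k - 2 : Nat) : Int) := by omega
      have h3 : ((k : Int) + 2) = ((k + 2 : Nat) : Int) := by omega
      rw [h2, h3, PySem.List.slice_natCast, pvDropTake _ (k - 2) _ false]
      rw [show min ((k - 2) + ((k + 2) - (k - 2))) (L.map (fun line =>
          pvKeywords.any (fun kw => PySem.Str.isIn kw (PySem.Str.lower line)))).length - (k - 2) =
          min (k + 2) L.length - (k - 2) by simp [List.length_map]; omega]
      rfl
    rw [e1, e2]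

theorem pvDedupFoldSnd (l : List String) :
    (l.foldl (fun (p : PySem.Set String × List String) line =>
        if !(PySem.Set.contains p.1 line) then (PySem.Set.add p.1 line, p.2 ++ [line])
        else p) (PySem.Set.empty, [])).2 = pvDedupFrom [] l := by
  have h := (pvDedupFold l PySem.Set.empty []).1
  rw [h]
  rfl

-- both ports, over an arbitrary line list
theorem pvPorts (L : List String) (message : String) (max_chars : Int) :
    (let relevant := (PySem.List.enumerate L).foldl
      (fun acc il =>
        if pvKeywords.any (fun kw => PySem.Str.isIn kw (PySem.Str.lower il.2)) then
          acc ++ PySem.List.slice L (some (max 0 (il.1 - 1)))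
            (some (min (PySem.List.len L) (il.1 + 3)))
        else acc) []
     if relevant ≠ [] then
       let su := relevant.foldl
         (fun (p : PySem.Set String × List String) line =>
           if !(PySem.Set.contains p.1 line) then (PySem.Set.add p.1 line, p.2 ++ [line])
           else p) (PySem.Set.empty, [])
       PySem.Str.slice (PySem.Str.join "\n" su.2) none (some max_chars)
     else
       PySem.Str.slice message none (some max_chars)) =
    (let hits := L.map
        (fun line => pvKeywords.any (fun kw => PySem.Str.isIn kw (PySem.Str.lower line)))
     let st := (PySem.List.enumerate L).foldl
       (fun (st : Bool × PySem.Set String × List String) jl =>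
         if (PySem.List.slice hits (some (max 0 (jl.1 - 2))) (some (jl.1 + 2))).any id then
           (true,
            if !(PySem.Set.contains st.2.1 jl.2) then
              (PySem.Set.add st.2.1 jl.2, st.2.2 ++ [jl.2])
            else st.2)
         else st)
       (false, PySem.Set.empty, [])
     if st.1 then PySem.Str.slice (PySem.Str.join "\n" st.2.2) none (some max_chars)
     else PySem.Str.slice message none (some max_chars)) := by
  simp only [pvRelA L, pvStB L]
  by_cases hm : pvMatches L = []
  · have hany : ((List.range L.length).any (pvTest L)) ≠ true :=
      fun h => (pvAnyTest L).mp h hm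
    simp [hm, hany]
  · have h1 : (pvMatches L).flatMap (pvWin L) ≠ [] := fun h => hm ((pvRelNil L).mp h)
    have h2 : (List.range L.length).any (pvTest L) = true := (pvAnyTest L).mpr hm
    rw [if_pos h1, h2]
    simp only [if_true]
    rw [pvDedupFoldSnd, pvDedupFoldSnd, pvFilterTest]
    exact congrArg (fun u => PySem.Str.slice (PySem.Str.join "\n" u) none (some max_chars))
      (pvMain L (pvMatches L) 0 [] (pvMatches_pairwise L) (pvMatches_lt L)
        (fun m _ => Nat.zero_le _) (Nat.zero_le _)
        (fun j hj _ _ => absurd hj (Nat.not_lt_zero j)))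

-- ===== VERDICT (by name: the statement is the Claim_ definition above) =====
theorem extract_decision_summary_spec : Claim_equal_extract_decision_summary := by
  intro message max_chars _
  show extract_decision_summary message max_chars = extract_decision_summary_alt message max_chars
  exact pvPorts ((PySem.Str.split? (PySem.Str.strip message) "\n").getD []) message max_chars
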